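-- pv_equiv track=rewrite | github.com/KhodeDan/PassWordManager | PasswordManager Project/coding/main/database/data.py | isusername
-- ===== SOURCE A (Python) =====
-- allowed_character = ["A", "B", "C", "D", "E", "F", "G", "H", "I", "J", "K", "L", "M", "N", "O", "P", "Q", "R", "S", "T", "U", "V", "W", "X", "Y", "Z", "a", "b", "c", "d", "e", "f", "g", "h", "i", "j", "k", "l", "m", "n", "o", "p", "q", "r", "s", "t", "u", "v", "w", "x", "y", "z" ,"0" , "1" , "2" , "3" , "4" , "5" , "6" , "7" , "8" , "9" , ]
--
-- def isusername(UserName : str):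
--
--     UserName_Last_Limit = 13
--     UserName_First_limit = 3
--     UserName_Lengh = len(UserName)
--
--
--     if UserName_First_limit > UserName_Lengh :
--         return False
--
--
--     if UserName_Last_Limit < UserName_Lengh:
--         return False
--
--
--     if UserName.isdigit():
--         return False
--
--
--     for character in UserName:
--
--         if character not in allowed_character:
--
--             return False
--
--     return True
-- ===== SOURCE B (Python) =====
-- def isusername(UserName: str):
--     # single-pass state machine: one scan classifying each character,
--     # tracking length so far and whether a letter was seen; early exit past 13
--     n = 0
--     saw_letter = False
--     for ch in UserName:
--         n += 1
--         if n > 13: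
--             return False
--         o = ord(ch)
--         if 48 <= o <= 57:
--             pass
--         elif 65 <= o <= 90 or 97 <= o <= 122:
--             saw_letter = True
--         else:
--             return False
--     return n >= 3 and saw_letter
-- ===== Notes on version B (the rewrite author's own statement) =====
-- stated objective: alternative
-- what changed: Replaced A's staged passes (length check, isdigit pass, then a per-character membership loop over a 62-element list) by a single-pass state machine that scans once, classifying each character by ord ranges while tracking the running length (early exit past 13) and a saw-letter flag that subsumes the all-digits rejection.
import Mathlib
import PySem

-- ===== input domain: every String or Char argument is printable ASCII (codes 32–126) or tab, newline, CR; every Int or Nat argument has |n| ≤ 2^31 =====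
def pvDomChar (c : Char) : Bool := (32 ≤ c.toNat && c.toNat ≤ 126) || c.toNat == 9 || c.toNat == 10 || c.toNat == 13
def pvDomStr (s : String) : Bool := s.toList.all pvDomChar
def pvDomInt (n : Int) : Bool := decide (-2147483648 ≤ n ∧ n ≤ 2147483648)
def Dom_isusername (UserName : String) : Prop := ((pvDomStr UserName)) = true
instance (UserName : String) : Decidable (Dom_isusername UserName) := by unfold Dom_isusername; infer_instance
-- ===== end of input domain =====

-- B replaces A's staged checks (length bounds, isdigit pass, per-character membership
-- loop over a 62-element list) by a single-pass state machine tracking length and a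
-- saw-letter flag; alternative decomposition, same behaviour.


-- ===== PORT A =====
-- Python's allowed_character is a list of one-character strings; membership of a
-- one-character string in it is exactly Char membership in this list (exact).
def allowedChars : List Char :=
  ['A','B','C','D','E','F','G','H','I','J','K','L','M',
   'N','O','P','Q','R','S','T','U','V','W','X','Y','Z',
   'a','b','c','d','e','f','g','h','i','j','k','l','m',
   'n','o','p','q','r','s','t','u','v','w','x','y','z',
   '0','1','2','3','4','5','6','7','8','9']

-- the `for character in UserName:` loop with its early `return False`
def isusernameLoop : List Char → Bool
  | [] => true
  | c :: rest => if c ∉ allowedChars then false else isusernameLoop rest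

def isusername (UserName : String) : Bool :=
  let lastLimit : Int := 13
  let firstLimit : Int := 3
  let lengh : Int := PySem.Str.len UserName
  if firstLimit > lengh then false
  else if lastLimit < lengh then false
  else if PySem.Str.strIsdigit UserName then false
  else isusernameLoop UserName.toList

-- ===== PORT B =====
-- character classes tested by ord ranges, as Source B does (Char.toNat = ord, exact)
def bIsDigitCh (c : Char) : Bool := decide (48 ≤ c.toNat ∧ c.toNat ≤ 57)
def bIsLetterCh (c : Char) : Bool :=
  decide ((65 ≤ c.toNat ∧ c.toNat ≤ 90) ∨ (97 ≤ c.toNat ∧ c.toNat ≤ 122))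

-- Source B's single for-loop: state = (count so far, saw_letter flag), early returns kept
def altLoop : List Char → Nat → Bool → Bool
  | [], n, sawLetter => decide (3 ≤ n) && sawLetter
  | c :: rest, n, sawLetter =>
    let n' := n + 1
    if 13 < n' then false
    else if bIsDigitCh c then altLoop rest n' sawLetter
    else if bIsLetterCh c then altLoop rest n' true
    else false

def isusername_alt (UserName : String) : Bool :=
  altLoop UserName.toList 0 false

-- ===== PRECONDITION & SPEC =====
def Spec_isusername (UserName : String) (out : Bool) : Prop := out = isusername_alt UserName
instance (UserName : String) (out : Bool) : Decidable (Spec_isusername UserName out) := by unfold Spec_isusername; infer_instance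

-- ===== CLAIM (what is proved, stated in full; the proofs are below) =====
def Claim_equal_isusername : Prop := ∀ (UserName : String), Dom_isusername UserName → Spec_isusername UserName (isusername UserName)

-- ===== LEMMAS AND PROOFS =====

-- A's allowed-character list holds exactly the (ASCII) alphanumeric characters
theorem mem_allowedChars_iff (c : Char) : (c ∈ allowedChars) ↔ PySem.Chars.isalnum c = true := by
  constructor
  · intro h
    fin_cases h <;> decide
  · intro h
    simp only [PySem.Chars.isalnum, PySem.Chars.isalpha, PySem.Chars.isupper, PySem.Chars.islower,
      PySem.Chars.isdigit, Bool.or_eq_true, Bool.and_eq_true, decide_eq_true_eq,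
      Char.le_def, UInt32.le_iff_toNat_le] at h
    have hA : ('A'.val.toNat) = 65 := rfl
    have hZ : ('Z'.val.toNat) = 90 := rfl
    have ha : ('a'.val.toNat) = 97 := rfl
    have hz : ('z'.val.toNat) = 122 := rfl
    have h0 : ('0'.val.toNat) = 48 := rfl
    have h9 : ('9'.val.toNat) = 57 := rfl
    have hc : c.val.toNat = c.toNat := rfl
    rw [hA, hZ, ha, hz, h0, h9, hc] at h
    have hofs := Char.ofNat_toNat c
    rcases h with (⟨hl, hr⟩ | ⟨hl, hr⟩) | ⟨hl, hr⟩ <;>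
      (interval_cases hn : c.toNat <;> (rw [← hofs]; decide))

-- B's ord-range classes against PySem's character predicates
theorem bIsDigitCh_eq (c : Char) : bIsDigitCh c = PySem.Chars.isdigit c := by
  simp only [bIsDigitCh, PySem.Chars.isdigit, Char.le_def, UInt32.le_iff_toNat_le]
  have h0 : ('0'.val.toNat) = 48 := rfl
  have h9 : ('9'.val.toNat) = 57 := rfl
  have hc : c.val.toNat = c.toNat := rfl
  rw [h0, h9, hc]
  by_cases ha : 48 ≤ c.toNat <;> by_cases hb : c.toNat ≤ 57 <;> simp [ha, hb]

theorem b_classes_eq_alnum (c : Char) :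
    (bIsDigitCh c || bIsLetterCh c) = PySem.Chars.isalnum c := by
  simp only [bIsDigitCh, bIsLetterCh, PySem.Chars.isalnum, PySem.Chars.isalpha,
    PySem.Chars.isupper, PySem.Chars.islower, PySem.Chars.isdigit,
    Char.le_def, UInt32.le_iff_toNat_le]
  have hA : ('A'.val.toNat) = 65 := rfl
  have hZ : ('Z'.val.toNat) = 90 := rfl
  have ha : ('a'.val.toNat) = 97 := rfl
  have hz : ('z'.val.toNat) = 122 := rfl
  have h0 : ('0'.val.toNat) = 48 := rfl
  have h9 : ('9'.val.toNat) = 57 := rfl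
  have hc : c.val.toNat = c.toNat := rfl
  rw [hA, hZ, ha, hz, h0, h9, hc]
  by_cases h1 : 48 ≤ c.toNat ∧ c.toNat ≤ 57 <;>
    by_cases h2 : (65 ≤ c.toNat ∧ c.toNat ≤ 90) ∨ (97 ≤ c.toNat ∧ c.toNat ≤ 122) <;>
      (simp [h1, h2]; try omega)

theorem letter_not_digit (c : Char) (h : bIsLetterCh c = true) :
    PySem.Chars.isdigit c = false := by
  rw [← bIsDigitCh_eq]
  simp only [bIsLetterCh, decide_eq_true_eq] at h
  simp only [bIsDigitCh, decide_eq_false_iff_not]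
  omega

-- the `for character in UserName` loop of A is the all-alnum test
theorem loop_eq_all (l : List Char) : isusernameLoop l = l.all PySem.Chars.isalnum := by
  induction l with
  | nil => rfl
  | cons c rest ih =>
    simp only [isusernameLoop, List.all_cons]
    by_cases h : c ∈ allowedChars
    · simp [h, (mem_allowedChars_iff c).mp h, ih]
    · have hf : PySem.Chars.isalnum c = false := by
        rcases Bool.eq_false_or_eq_true (PySem.Chars.isalnum c) with hx | hx
        · exact absurd ((mem_allowedChars_iff c).mpr hx) h
        · exact hx
      simp [h, hf]

-- invariant of Source B's loop: for a start count ≤ 13 it computes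
-- "total length ≤ 13, all chars alnum, total length ≥ 3, and a letter seen or pending"
theorem altLoop_spec (l : List Char) (n : Nat) (saw : Bool) (hn : n ≤ 13) :
    altLoop l n saw =
      (decide (n + l.length ≤ 13) && l.all PySem.Chars.isalnum
        && decide (3 ≤ n + l.length) && (saw || l.any bIsLetterCh)) := by
  induction l generalizing n saw with
  | nil => simp [altLoop, hn]
  | cons c rest ih =>
    simp only [altLoop, List.length_cons, List.all_cons, List.any_cons]
    by_cases h13 : 13 < n + 1
    · have : ¬ (n + (rest.length + 1) ≤ 13) := by omega
      simp [h13, this]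
    · have hn' : n + 1 ≤ 13 := by omega
      rw [if_neg h13]
      by_cases hd : bIsDigitCh c = true
      · have halnum : PySem.Chars.isalnum c = true := by
          rw [← b_classes_eq_alnum, hd]; rfl
        have hlet : bIsLetterCh c = false := by
          rcases Bool.eq_false_or_eq_true (bIsLetterCh c) with hx | hx
          · exact absurd (letter_not_digit c hx) (by rw [← bIsDigitCh_eq]; simp [hd])
          · exact hx
        rw [hd, if_pos rfl, ih n.succ saw hn']
        simp only [halnum, hlet, Bool.true_and, Bool.false_or]
        have e1 : n + 1 + rest.length = n + (rest.length + 1) := by omega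
        rw [e1]
        rfl
      · have hdf : bIsDigitCh c = false := by simpa using hd
        rw [hdf, if_neg (by simp)]
        by_cases hl : bIsLetterCh c = true
        · have halnum : PySem.Chars.isalnum c = true := by
            rw [← b_classes_eq_alnum, hl]; simp
          rw [hl, if_pos rfl, ih n.succ true hn']
          simp only [halnum, Bool.true_and, Bool.true_or, Bool.or_true]
          have e1 : n + 1 + rest.length = n + (rest.length + 1) := by omega
          rw [e1]
          rfl
        · have hlf : bIsLetterCh c = false := by simpa using hl
          have halnum : PySem.Chars.isalnum c = false := by
            rw [← b_classes_eq_alnum, hdf, hlf]; rfl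
          simp [hlf, halnum]

-- ===== VERDICT (by name: the statement is the Claim_ definition above) =====
theorem isusername_spec : Claim_equal_isusername := by
  intro u _
  unfold Spec_isusername isusername isusername_alt
  rw [PySem.Str.len_eq, PySem.Str.strIsdigit_eq]
  rw [altLoop_spec u.toList 0 false (by omega), loop_eq_all]
  set l := u.toList with hl
  simp only [Nat.zero_add, Bool.false_or]
  by_cases h3 : (3 : Int) > (l.length : Int)
  · have : ¬ (3 ≤ l.length) := by omega
    simp [h3, this]
  · by_cases h13 : (13 : Int) < (l.length : Int)
    · have : ¬ (l.length ≤ 13) := by omega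
      simp [h3, h13, this]
    · have h3' : 3 ≤ l.length := by omega
      have h13' : l.length ≤ 13 := by omega
      rw [if_neg h3, if_neg h13]
      have hne : l ≠ [] := by
        intro h; rw [h] at h3'; simp at h3'
      by_cases hd : PySem.Chars.strIsdigit l = true
      · -- all digits: no letter can occur, B's final saw_letter test fails too
        have hall : l.all PySem.Chars.isdigit = true := by
          simp only [PySem.Chars.strIsdigit, Bool.and_eq_true] at hd
          exact hd.2
        have hnolet : l.any bIsLetterCh = false := by
          rw [List.any_eq_false]
          intro c hc hcl
          have := letter_not_digit c hcl
          rw [List.all_eq_true] at hall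
          have := hall c hc
          simp_all
        simp [hd, hnolet]
      · have hdf : PySem.Chars.strIsdigit l = false := by
          rcases Bool.eq_false_or_eq_true (PySem.Chars.strIsdigit l) with hx | hx
          · exact absurd hx hd
          · exact hx
        rw [hdf, if_neg (by simp)]
        by_cases hall : l.all PySem.Chars.isalnum = true
        · -- not all digits + all alnum ⇒ some letter
          have : ∃ c ∈ l, PySem.Chars.isdigit c = false := by
            simp only [PySem.Chars.strIsdigit] at hdf
            rcases Bool.eq_false_or_eq_true (l.all PySem.Chars.isdigit) with hx | hx
            · exfalso
              have hiso : l.isEmpty = false := by simp [hne]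
              rw [hx, hiso] at hdf
              simp at hdf
            · rw [List.all_eq_false] at hx
              rcases hx with ⟨c, hc, hcd⟩
              exact ⟨c, hc, by simpa using hcd⟩
          rcases this with ⟨c, hc, hcd⟩
          have hcl : bIsLetterCh c = true := by
            rw [List.all_eq_true] at hall
            have := hall c hc
            rw [← b_classes_eq_alnum, bIsDigitCh_eq, hcd] at this
            simpa using this
          have hany : l.any bIsLetterCh = true := List.any_eq_true.mpr ⟨c, hc, hcl⟩
          simp [hall, hany, h3', h13']
        · have hf : l.all PySem.Chars.isalnum = false := by
            rcases Bool.eq_false_or_eq_true (l.all PySem.Chars.isalnum) with hx | hx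
            · exact absurd hx hall
            · exact hx
          simp [hf]
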